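-- pv_equiv track=rewrite | github.com/ishmam-br10/221-Algorithm | Ishmam Bin Rafi_ Lab3/task4.py | compute_task_result
-- ===== SOURCE A (Python) =====
-- def calculate_secondary_result(left_vals, right_vals):
--     left_max = max(left_vals)
--     right_max = max(map(abs, right_vals))
--     return int(left_max + right_max ** 2)
--
-- def compute_task_result(elements):
--     if len(elements) == 2:
--         return elements[0] + elements[-1] ** 2
--     elif len(elements) < 2:
--         return 0
--     half_length = len(elements) // 2
--     left_result = compute_task_result(elements[:half_length])
--     right_result = compute_task_result(elements[half_length:])
--     secondary_result = calculate_secondary_result(elements[:half_length], elements[half_length:])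
--     return max(left_result, right_result, secondary_result)
-- ===== SOURCE B (Python) =====
-- def compute_task_result(elements):
--     # Single O(n) recursion over index ranges, returning (result, max, max_abs)
--     # for each range so no slice copies and no repeated max scans are needed.
--     if len(elements) < 2:
--         return 0
--
--     def agg(lo, hi):
--         # aggregates of elements[lo:hi]; always called with lo < hi
--         if hi - lo == 1:
--             e = elements[lo]
--             return 0, e, abs(e)
--         if hi - lo == 2:
--             a = elements[lo]
--             b = elements[lo + 1]
--             return a + b * b, max(a, b), max(abs(a), abs(b))
--         mid = lo + (hi - lo) // 2
--         lr, lm, la = agg(lo, mid)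
--         rr, rm, ra = agg(mid, hi)
--         return max(max(lr, rr), lm + ra * ra), max(lm, rm), max(la, ra)
--
--     return agg(0, len(elements))[0]
-- ===== Notes on version B (the rewrite author's own statement) =====
-- stated objective: faster
-- what changed: Replaces the divide-and-conquer that rescans each half with max()/map(abs) at every level (and copies slices) by a single index-based recursion returning (result, range max, range max-abs) and combining the three aggregates in O(1) per node.
import Mathlib
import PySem

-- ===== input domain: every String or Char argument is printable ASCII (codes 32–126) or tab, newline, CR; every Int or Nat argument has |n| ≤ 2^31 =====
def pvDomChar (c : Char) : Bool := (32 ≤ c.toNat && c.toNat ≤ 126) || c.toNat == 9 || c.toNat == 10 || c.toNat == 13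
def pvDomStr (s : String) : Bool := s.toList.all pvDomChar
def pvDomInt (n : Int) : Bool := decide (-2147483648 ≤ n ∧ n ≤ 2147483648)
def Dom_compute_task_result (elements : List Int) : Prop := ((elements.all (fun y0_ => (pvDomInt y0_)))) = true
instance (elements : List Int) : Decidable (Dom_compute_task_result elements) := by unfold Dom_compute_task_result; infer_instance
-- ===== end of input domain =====

-- B replaces A's divide-and-conquer with per-level max rescans (O(n log n)) by one
-- index-based recursion returning (result, max, max_abs) per range, combined in O(1).

-- ===== PORT A =====
def calculate_secondary_result (left_vals right_vals : List Int) : Int :=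
  -- Python max raises on an empty list; the .getD 0 default is a totality guard only:
  -- compute_task_result never passes an empty list here.
  let left_max := (PySem.List.max? left_vals (fun y => y)).getD 0
  let right_max := (PySem.List.max? (right_vals.map (fun x => |x|)) (fun y => y)).getD 0
  left_max + right_max ^ 2

def compute_task_result (elements : List Int) : Int :=
  if elements.length = 2 then
    PySem.List.pyGetD elements 0 0 + PySem.List.pyGetD elements (-1) 0 ^ 2
  else if elements.length < 2 then 0
  else
    let half : Int := PySem.Int.floordiv (elements.length : Int) 2
    let left_result := compute_task_result (PySem.List.slice elements none (some half))
    let right_result := compute_task_result (PySem.List.slice elements (some half) none)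
    let secondary_result := calculate_secondary_result
      (PySem.List.slice elements none (some half)) (PySem.List.slice elements (some half) none)
    max (max left_result right_result) secondary_result
termination_by elements.length
decreasing_by
  all_goals
    have h : (PySem.Int.floordiv (elements.length : Int) 2) = ((elements.length / 2 : Nat) : Int) := by
      exact_mod_cast PySem.Int.floordiv_natCast elements.length 2
    rw [h]
    first
      | rw [PySem.List.slice_to_natCast]
      | rw [PySem.List.slice_from_natCast]
    simp
    omega

-- ===== PORT B =====
-- agg lo hi = (result, max, max_abs) of elements[lo:hi]; always called with lo < hi
-- (the hi ≤ lo branch is a totality guard for an unreachable call).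
def agg (elements : List Int) (lo hi : Nat) : Int × Int × Int :=
  if hi ≤ lo then (0, 0, 0)
  else if hi - lo = 1 then
    let e := PySem.List.pyGetD elements (lo : Int) 0
    (0, e, |e|)
  else if hi - lo = 2 then
    let a := PySem.List.pyGetD elements (lo : Int) 0
    let b := PySem.List.pyGetD elements ((lo : Int) + 1) 0
    (a + b * b, max a b, max |a| |b|)
  else
    let mid := lo + (hi - lo) / 2
    let l3 := agg elements lo mid
    let r3 := agg elements mid hi
    (max (max l3.1 r3.1) (l3.2.1 + r3.2.2 * r3.2.2), max l3.2.1 r3.2.1, max l3.2.2 r3.2.2)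
termination_by hi - lo
decreasing_by
  · omega
  · omega

def compute_task_result_alt (elements : List Int) : Int :=
  if elements.length < 2 then 0
  else (agg elements 0 elements.length).1

-- ===== PRECONDITION & SPEC =====
def Spec_compute_task_result (elements : List Int) (out : Int) : Prop := out = compute_task_result_alt elements
instance (elements : List Int) (out : Int) : Decidable (Spec_compute_task_result elements out) := by unfold Spec_compute_task_result; infer_instance

-- ===== CLAIM (what is proved, stated in full; the proofs are below) =====
def Claim_equal_compute_task_result : Prop := ∀ (elements : List Int), Dom_compute_task_result elements → Spec_compute_task_result elements (compute_task_result elements)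

-- ===== LEMMAS AND PROOFS =====

/-- running max of a nonempty list (value of Python `max(xs)`). -/
def mx (xs : List Int) : Int :=
  match xs with
  | [] => 0
  | x :: t => t.foldl max x

lemma foldl_max_init (t : List Int) (a b : Int) :
    List.foldl max (max a b) t = max a (List.foldl max b t) := by
  induction t generalizing b with
  | nil => simp
  | cons c t ih => simpa [max_assoc] using ih (max b c)

lemma mx_append (xs ys : List Int) (hx : xs ≠ []) (hy : ys ≠ []) :
    mx (xs ++ ys) = max (mx xs) (mx ys) := by
  cases xs with
  | nil => simp at hx
  | cons x t =>
    cases ys with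
    | nil => simp at hy
    | cons y u =>
      simp [mx, List.foldl_append]
      rw [foldl_max_init]

lemma max?_eq_mx (xs : List Int) (hx : xs ≠ []) :
    PySem.List.max? xs (fun y => y) = some (mx xs) := by
  cases xs with
  | nil => simp at hx
  | cons x t => rw [PySem.List.max?_id_cons]; rfl

/-- key invariant: agg returns (A's result, max, max of abs) of the subrange. -/
lemma agg_eq (elements : List Int) (lo hi : Nat) (hlh : lo < hi) (hhi : hi ≤ elements.length) :
    agg elements lo hi =
      (compute_task_result ((elements.drop lo).take (hi - lo)),
       mx ((elements.drop lo).take (hi - lo)),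
       mx (((elements.drop lo).take (hi - lo)).map (fun x => |x|))) := by
  induction hn : hi - lo using Nat.strong_induction_on generalizing lo hi with
  | _ n ih =>
  subst hn
  have hlolen : lo < elements.length := lt_of_lt_of_le hlh hhi
  rw [agg]
  rw [if_neg (by omega : ¬ hi ≤ lo)]
  by_cases h1 : hi - lo = 1
  · -- single element
    rw [if_pos h1, h1]
    have hdrop : elements.drop lo = elements[lo] :: elements.drop (lo + 1) :=
      List.drop_eq_getElem_cons hlolen
    have hsub : (elements.drop lo).take 1 = [elements[lo]] := by rw [hdrop]; rfl
    rw [hsub]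
    have hget : PySem.List.pyGetD elements (lo : Int) 0 = elements[lo] := by
      simp [List.getD_eq_getElem?_getD, hlolen]
    rw [compute_task_result]
    simp [hget, mx]
  · by_cases h2 : hi - lo = 2
    · -- two elements
      rw [if_neg h1, if_pos h2, h2]
      have hlo1 : lo + 1 < elements.length := by omega
      have hdrop : elements.drop lo = elements[lo] :: elements.drop (lo + 1) :=
        List.drop_eq_getElem_cons hlolen
      have hdrop1 : elements.drop (lo + 1) = elements[lo + 1] :: elements.drop (lo + 2) :=
        List.drop_eq_getElem_cons hlo1
      have hsub : (elements.drop lo).take 2 = [elements[lo], elements[lo + 1]] := by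
        rw [hdrop, hdrop1]; rfl
      rw [hsub]
      have hga : PySem.List.pyGetD elements (lo : Int) 0 = elements[lo] := by
        simp [List.getD_eq_getElem?_getD, hlolen]
      have hgb : PySem.List.pyGetD elements ((lo : Int) + 1) 0 = elements[lo + 1] := by
        rw [← Nat.cast_add_one, PySem.List.pyGetD_natCast]
        simp [List.getD_eq_getElem?_getD, hlo1]
      rw [compute_task_result]
      simp only [List.length_cons, List.length_nil, if_pos]
      have hA0 : PySem.List.pyGetD [elements[lo], elements[lo + 1]] 0 0 = elements[lo] := rfl
      have hA1 : PySem.List.pyGetD [elements[lo], elements[lo + 1]] (-1) 0 = elements[lo + 1] := rfl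
      rw [hA0, hA1, hga, hgb]
      simp [mx, pow_two]
    · -- recursive case: hi - lo ≥ 3
      rw [if_neg h1, if_neg h2]
      have h3 : 3 ≤ hi - lo := by omega
      set m := (hi - lo) / 2 with hm
      have hm1 : 1 ≤ m := by omega
      have hmlt : m < hi - lo := by omega
      have hmid : lo + m < hi := by omega
      have ihL := ih (lo + m - lo) (by omega) lo (lo + m) (by omega) (by omega) rfl
      have ihR := ih (hi - (lo + m)) (by omega) (lo + m) hi (by omega) hhi rfl
      have hLlo : lo + m - lo = m := by omega
      rw [hLlo] at ihL
      -- the two sublists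
      set subL := (elements.drop lo).take m with hsubL
      set subR := (elements.drop (lo + m)).take (hi - (lo + m)) with hsubR
      set sub := (elements.drop lo).take (hi - lo) with hsubdef
      have hLtake : subL = sub.take m := by
        rw [hsubL, hsubdef, List.take_take, min_eq_left (by omega)]
      have hRdrop : subR = sub.drop m := by
        rw [hsubR, hsubdef, List.drop_take, List.drop_drop]
        congr 1
        omega
      have hsplit : sub = subL ++ subR := by
        rw [hLtake, hRdrop, List.take_append_drop]
      have hlenL : subL.length = m := by
        rw [hsubL]; simp; omega
      have hlenR : subR.length = hi - (lo + m) := by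
        rw [hsubR]; simp; omega
      have hLne : subL ≠ [] := by
        intro h; rw [h] at hlenL; simp at hlenL; omega
      have hRne : subR ≠ [] := by
        intro h; rw [h] at hlenR; simp at hlenR; omega
      have hlensub : sub.length = hi - lo := by
        rw [hsubdef]; simp; omega
      -- unfold A on sub
      have hAsub : compute_task_result sub =
          max (max (compute_task_result subL) (compute_task_result subR))
            (calculate_secondary_result subL subR) := by
        have hne2 : ¬ sub.length = 2 := by omega
        have hnl2 : ¬ sub.length < 2 := by omega
        have hhalf : PySem.Int.floordiv (sub.length : Int) 2 = ((m : Nat) : Int) := by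
          have := PySem.Int.floordiv_natCast sub.length 2
          rw [hlensub] at this ⊢
          exact_mod_cast this
        rw [compute_task_result]
        simp only [if_neg hne2, if_neg hnl2, hhalf, PySem.List.slice_to_natCast,
          PySem.List.slice_from_natCast, ← hLtake, ← hRdrop]
      -- evaluate the secondary result
      have hcalc : calculate_secondary_result subL subR =
          mx subL + mx (subR.map (fun x => |x|)) ^ 2 := by
        unfold calculate_secondary_result
        rw [max?_eq_mx subL hLne, max?_eq_mx (subR.map (fun x => |x|)) (by simp [hRne])]
        rfl
      simp only [ihL, ihR]
      have hmapsplit : sub.map (fun x => |x|) = subL.map (fun x => |x|) ++ subR.map (fun x => |x|) := by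
        rw [hsplit, List.map_append]
      refine Prod.ext ?_ (Prod.ext ?_ ?_)
      · simp only
        rw [hAsub, hcalc, pow_two]
      · simp only
        rw [hsplit, mx_append subL subR hLne hRne]
      · simp only
        rw [hmapsplit, mx_append _ _ (by simp [hLne]) (by simp [hRne])]

theorem compute_task_result_spec : Claim_equal_compute_task_result := by
  intro elements _
  unfold Spec_compute_task_result compute_task_result_alt
  by_cases h : elements.length < 2
  · rw [if_pos h, compute_task_result]
    have h2 : ¬ elements.length = 2 := by omega
    simp [h2, h]
  · rw [if_neg h, agg_eq elements 0 elements.length (by omega) (by omega)]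
    simp
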